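-- pv_equiv track=rewrite | github.com/Sumanth-Katnam/leet-code-py | Interview Questions OLD/minimize reduce.py | minimizeCostB
-- ===== SOURCE A (Python) =====
-- def minimizeCostB(arr):
--     arr.sort()
--     first = arr[0]
--     sum = 0
--     for i in range(1, len(arr)):
--         sum += first + arr[i]
--         first = sum
--     return sum
-- ===== SOURCE B (Python) =====
-- def minimizeCostB(arr):
--     arr.sort()
--     n = len(arr)
--     if n < 2:
--         return 0
--     total = 0
--     p = 1
--     for i in range(n - 1, 1, -1):
--         total += arr[i] * p
--         p *= 2
--     return total + (arr[0] + arr[1]) * p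
-- ===== Notes on version B (the rewrite author's own statement) =====
-- stated objective: alternative
-- what changed: B replaces A's sequential running-total accumulation with a direct weighted sum over the sorted list: the two smallest elements get weight 2^(n-2) and the i-th smallest (i>=2, 0-based) gets weight 2^(n-1-i), each contribution computed independently in one pass.
import Mathlib
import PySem

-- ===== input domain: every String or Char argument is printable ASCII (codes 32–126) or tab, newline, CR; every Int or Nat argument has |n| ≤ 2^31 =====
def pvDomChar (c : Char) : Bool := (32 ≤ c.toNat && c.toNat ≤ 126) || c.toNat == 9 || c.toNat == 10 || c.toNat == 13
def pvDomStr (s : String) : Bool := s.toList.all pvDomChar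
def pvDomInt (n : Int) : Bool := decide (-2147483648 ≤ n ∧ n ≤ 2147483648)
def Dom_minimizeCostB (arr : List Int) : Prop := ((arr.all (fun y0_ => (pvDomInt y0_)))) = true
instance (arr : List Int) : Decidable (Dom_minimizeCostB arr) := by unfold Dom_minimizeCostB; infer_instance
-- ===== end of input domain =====

-- B computes the same merge cost as a direct weighted sum over the sorted list instead of A's
-- running-total accumulation ("alternative" objective). Both Pythons sort arr in place; the
-- equivalence proved here is about the RETURN value (B performs the same in-place sort as A).

-- ===== PORT A =====
-- A's body after `arr.sort()`, on the sorted list s.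
def pvRunA (s : List Int) : Int :=
  match PySem.List.pyGet? s 0 with          -- first element: IndexError on [] (excluded by Pre_)
  | none => 0
  | some first0 =>
    (((PySem.List.pyRange 1 (s.length : Int) 1).foldl
        (fun (st : Int × Int) i =>
          (st.2 + (st.1 + PySem.List.pyGetD s i 0),      -- sum += first + s_i
           st.2 + (st.1 + PySem.List.pyGetD s i 0)))     -- first := sum
        (first0, 0)).2)

def minimizeCostB (arr : List Int) : Int :=
  pvRunA (PySem.List.sorted arr (fun x => x) false)      -- arr.sort()

-- ===== PORT B =====
-- B's body after `arr.sort()`, on the sorted list s: descending index loop, incremental power p.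
def pvRunB (s : List Int) : Int :=
  if s.length < 2 then 0
  else
    let r := (PySem.List.pyRange ((s.length : Int) - 1) 1 (-1)).foldl
        (fun (st : Int × Int) i =>
          (st.1 + PySem.List.pyGetD s i 0 * st.2,      -- total += arr[i] * p
           st.2 * 2))                                  -- p *= 2
        (0, 1)
    r.1 + (PySem.List.pyGetD s 0 0 + PySem.List.pyGetD s 1 0) * r.2

def minimizeCostB_alt (arr : List Int) : Int :=
  pvRunB (PySem.List.sorted arr (fun x => x) false)      -- arr.sort()

-- ===== PRECONDITION & SPEC =====
-- Pre_ excludes only the empty list, on which A raises IndexError at its first-element access.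
def Pre_minimizeCostB (arr : List Int) : Prop := arr ≠ []
instance (arr : List Int) : Decidable (Pre_minimizeCostB arr) := by unfold Pre_minimizeCostB; infer_instance
def pvWitness_minimizeCostB : List Int := [3, 1, 2]

def Spec_minimizeCostB (arr : List Int) (out : Int) : Prop := out = minimizeCostB_alt arr
instance (arr : List Int) (out : Int) : Decidable (Spec_minimizeCostB arr out) := by unfold Spec_minimizeCostB; infer_instance

-- ===== CLAIM (what is proved, stated in full; the proofs are below) =====
def Claim_equal_minimizeCostB : Prop := ∀ (arr : List Int), Dom_minimizeCostB arr → Pre_minimizeCostB arr → Spec_minimizeCostB arr (minimizeCostB arr)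

-- ===== LEMMAS AND PROOFS =====

-- A's loop over i ∈ range(2, k), once the state is a diagonal pair (v, v), computes the weighted sum.
lemma pvLoopA_weighted (s : List Int) (v : Int) :
    ∀ (k : Nat), 2 ≤ k →
      (PySem.List.pyRange 2 (k : Int) 1).foldl
          (fun (st : Int × Int) i =>
            (st.2 + (st.1 + PySem.List.pyGetD s i 0),
             st.2 + (st.1 + PySem.List.pyGetD s i 0)))
          (v, v)
        = (v * 2 ^ (k - 2) +
             ((PySem.List.pyRange 2 (k : Int) 1).map
               (fun i => PySem.List.pyGetD s i 0 * 2 ^ (k - 1 - i.toNat))).sum,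
           v * 2 ^ (k - 2) +
             ((PySem.List.pyRange 2 (k : Int) 1).map
               (fun i => PySem.List.pyGetD s i 0 * 2 ^ (k - 1 - i.toNat))).sum) := by
  intro k hk
  induction k, hk using Nat.le_induction with
  | base =>
      norm_num [PySem.List.pyRange_one_eq_nil]
  | succ k hk ih =>
      have hcast : ((k + 1 : Nat) : Int) = (k : Int) + 1 := by push_cast; ring
      rw [hcast, PySem.List.pyRange_one_succ_right (show (2 : Int) ≤ (k : Int) by exact_mod_cast hk),
          List.foldl_append, ih]
      have hmap : (PySem.List.pyRange 2 (k : Int) 1).map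
            (fun i => PySem.List.pyGetD s i 0 * 2 ^ (k + 1 - 1 - i.toNat))
          = (PySem.List.pyRange 2 (k : Int) 1).map
            (fun i => 2 * (PySem.List.pyGetD s i 0 * 2 ^ (k - 1 - i.toNat))) := by
        refine List.map_congr_left ?_
        intro i hi
        rw [PySem.List.mem_pyRange_one] at hi
        have hexp : k + 1 - 1 - i.toNat = (k - 1 - i.toNat) + 1 := by omega
        rw [hexp, pow_succ]
        ring
      simp only [List.foldl_cons, List.foldl_nil, List.map_append, List.map_cons, List.map_nil,
        List.sum_append, List.sum_cons, List.sum_nil, Int.toNat_natCast]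
      have e0 : k + 1 - 1 - k = 0 := by omega
      have e2 : k + 1 - 2 = (k - 2) + 1 := by omega
      rw [hmap, List.sum_map_mul_left, e0, e2, pow_succ, pow_zero, mul_one, Prod.mk.injEq]
      exact ⟨by ring, by ring⟩

-- B's descending loop over i ∈ range(m, 1, -1) from (T, P): total gains the weighted tail, p becomes P * 2^(m-1).
lemma pvLoopB_weighted (s : List Int) :
    ∀ (m : Nat), 1 ≤ m → ∀ (T P : Int),
      (PySem.List.pyRange (m : Int) 1 (-1)).foldl
          (fun (st : Int × Int) i =>
            (st.1 + PySem.List.pyGetD s i 0 * st.2, st.2 * 2))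
          (T, P)
        = (T + P * ((PySem.List.pyRange 2 ((m : Int) + 1) 1).map
              (fun i => PySem.List.pyGetD s i 0 * 2 ^ (m - i.toNat))).sum,
           P * 2 ^ (m - 1)) := by
  intro m hm
  induction m, hm using Nat.le_induction with
  | base =>
      intro T P
      norm_num [PySem.List.pyRange_neg_one_eq_nil, PySem.List.pyRange_one_eq_nil]
  | succ m hm ih =>
      intro T P
      have hcast : ((m + 1 : Nat) : Int) = (m : Int) + 1 := by push_cast; ring
      have hlt : (1 : Int) < (m : Int) + 1 := by exact_mod_cast Nat.lt_succ_of_le hm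
      rw [hcast, PySem.List.pyRange_neg_one_cons hlt, List.foldl_cons, add_sub_cancel_right]
      rw [ih (T + PySem.List.pyGetD s ((m : Int) + 1) 0 * P) (P * 2)]
      rw [PySem.List.pyRange_one_succ_right (show (2 : Int) ≤ (m : Int) + 1 by omega)]
      have hmap : (PySem.List.pyRange 2 ((m : Int) + 1) 1).map
            (fun i => PySem.List.pyGetD s i 0 * 2 ^ (m + 1 - i.toNat))
          = (PySem.List.pyRange 2 ((m : Int) + 1) 1).map
            (fun i => 2 * (PySem.List.pyGetD s i 0 * 2 ^ (m - i.toNat))) := by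
        refine List.map_congr_left ?_
        intro i hi
        rw [PySem.List.mem_pyRange_one] at hi
        have hexp : m + 1 - i.toNat = (m - i.toNat) + 1 := by omega
        rw [hexp, pow_succ]
        ring
      have ht : ((m : Int) + 1).toNat = m + 1 := by omega
      simp only [List.map_append, List.map_cons, List.map_nil, List.sum_append, List.sum_cons,
        List.sum_nil, ht]
      have e0 : m + 1 - (m + 1) = 0 := by omega
      have e1 : m + 1 - 1 = (m - 1) + 1 := by omega
      rw [hmap, List.sum_map_mul_left, e0, e1, pow_succ, pow_zero, mul_one, Prod.mk.injEq]
      exact ⟨by ring, by ring⟩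

-- On any nonempty list, A's accumulation equals B's weighted sum.
lemma pvRunA_eq_pvRunB (s : List Int) (hsne : s ≠ []) : pvRunA s = pvRunB s := by
  obtain _ | ⟨a, _ | ⟨b, t⟩⟩ := s
  · exact absurd rfl hsne
  · norm_num [pvRunA, pvRunB, pysem, PySem.List.pyRange_one_eq_nil]
  · unfold pvRunA pvRunB
    have hget : PySem.List.pyGet? (a :: b :: t) (0 : Int) = some a := by simp [pysem]
    have hg0 : PySem.List.pyGetD (a :: b :: t) (0 : Int) 0 = a := by simp [pysem]
    have hg1 : PySem.List.pyGetD (a :: b :: t) (1 : Int) 0 = b := by simp [pysem]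
    simp only [hget, List.length_cons]
    have hb1 : (1 : Int) < ((t.length + 1 + 1 : Nat) : Int) := by push_cast; omega
    rw [PySem.List.pyRange_one_cons hb1, show (1 : Int) + 1 = 2 by norm_num]
    simp only [List.foldl_cons, hg1, zero_add]
    rw [pvLoopA_weighted (a :: b :: t) (a + b) (t.length + 1 + 1) (by omega)]
    rw [if_neg (by omega)]
    have hm1 : ((t.length + 1 + 1 : Nat) : Int) - 1 = ((t.length + 1 : Nat) : Int) := by
      push_cast; ring
    rw [hm1, pvLoopB_weighted (a :: b :: t) (t.length + 1) (by omega) 0 1]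
    have hr : ((t.length + 1 : Nat) : Int) + 1 = ((t.length + 1 + 1 : Nat) : Int) := by
      push_cast; ring
    simp only [hr, hg0, zero_add, one_mul]
    have e1 : t.length + 1 + 1 - 2 = t.length := by omega
    have e2 : t.length + 1 - 1 = t.length := by omega
    have e3 : t.length + 1 + 1 - 1 = t.length + 1 := by omega
    simp only [e1, e2, e3]
    ring

theorem minimizeCostB_spec : Claim_equal_minimizeCostB := by
  intro arr _ hpre
  unfold Spec_minimizeCostB minimizeCostB minimizeCostB_alt
  exact pvRunA_eq_pvRunB _ (by simpa [PySem.List.sorted_eq_nil_iff] using hpre)
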